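-- pv_equiv track=rewrite | github.com/karthikkk16/SpecialSubsequencesAG | SpecialSequencesAG.py | SpecialSubsequencesAG
-- ===== SOURCE A (Python) =====
-- def SpecialSubsequencesAG(sequence):
--     s=sequence.lower()
--     count=0
--     result=0
--     for i in s:
--         if i=='a':
--             count+=1
--         elif i=='g':
--             result+=count
--
--     return result
-- ===== SOURCE B (Python) =====
-- def SpecialSubsequencesAG(sequence):
--     s = sequence.lower()
--     return sum(s[:i].count('a') for i, c in enumerate(s) if c == 'g')
-- ===== Notes on version B (the rewrite author's own statement) =====
-- stated objective: alternative
-- what changed: Replaces the running a-counter accumulated in one pass by a per-'g' re-scan: for each index holding 'g', count the 'a's in the prefix s[:i] and sum these counts.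
import Mathlib
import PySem

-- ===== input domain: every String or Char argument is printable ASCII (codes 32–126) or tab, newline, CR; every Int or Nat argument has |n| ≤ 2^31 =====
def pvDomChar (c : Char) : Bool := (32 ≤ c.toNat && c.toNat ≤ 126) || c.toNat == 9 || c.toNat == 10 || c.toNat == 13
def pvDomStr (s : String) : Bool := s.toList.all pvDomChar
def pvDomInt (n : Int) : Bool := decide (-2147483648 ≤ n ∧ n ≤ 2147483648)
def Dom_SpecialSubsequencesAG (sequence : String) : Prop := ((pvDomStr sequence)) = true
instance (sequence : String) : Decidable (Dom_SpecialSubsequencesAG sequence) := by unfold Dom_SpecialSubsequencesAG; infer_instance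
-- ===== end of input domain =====

-- ===== PORT A =====
-- Header: B computes the same a..g subsequence count by re-scanning each prefix per 'g'
-- instead of keeping a running 'a' counter (objective: alternative decomposition).
-- A: one pass keeping a running count of 'a's and an accumulated result.
def SpecialSubsequencesAG (sequence : String) : Int :=
  (((PySem.Str.lower sequence).toList).foldl
    (fun (st : Int × Int) (i : Char) =>
      if i = 'a' then (st.1 + 1, st.2)
      else if i = 'g' then (st.1, st.2 + st.1)
      else st)
    (0, 0)).2

-- ===== PORT B =====
-- B: for each position holding 'g', count the 'a's in the prefix before it and sum.
-- The generator walks the string carrying the prefix seen so far; `pre.count 'a'`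
-- is exactly Python's s[:i].count('a') since pre = the first i characters.
def pvBSum (pre : List Char) : List Char → Int
  | [] => 0
  | c :: rest =>
      (if c = 'g' then (pre.count 'a' : Int) else 0) + pvBSum (pre ++ [c]) rest

def SpecialSubsequencesAG_alt (sequence : String) : Int :=
  pvBSum [] ((PySem.Str.lower sequence).toList)

-- ===== PRECONDITION & SPEC =====
def Spec_SpecialSubsequencesAG (sequence : String) (out : Int) : Prop := out = SpecialSubsequencesAG_alt sequence
instance (sequence : String) (out : Int) : Decidable (Spec_SpecialSubsequencesAG sequence out) := by unfold Spec_SpecialSubsequencesAG; infer_instance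

-- ===== CLAIM (what is proved, stated in full; the proofs are below) =====
def Claim_equal_SpecialSubsequencesAG : Prop := ∀ (sequence : String), Dom_SpecialSubsequencesAG sequence → Spec_SpecialSubsequencesAG sequence (SpecialSubsequencesAG sequence)

-- ===== LEMMAS AND PROOFS =====
-- Loop invariant: if the running counter equals the number of 'a's in the prefix
-- consumed so far, A's fold over the rest yields r0 plus B's sum over the rest.
theorem pvFold_eq_bsum (t : List Char) : ∀ (pre : List Char) (c0 r0 : Int),
    c0 = (pre.count 'a' : Int) →
    ((t.foldl
      (fun (st : Int × Int) (i : Char) =>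
        if i = 'a' then (st.1 + 1, st.2)
        else if i = 'g' then (st.1, st.2 + st.1)
        else st)
      (c0, r0)).2) = r0 + pvBSum pre t := by
  induction t with
  | nil => intro pre c0 r0 h; simp [pvBSum]
  | cons c rest ih =>
      intro pre c0 r0 h
      by_cases ha : c = 'a'
      · subst ha
        simp only [List.foldl_cons, pvBSum, reduceIte]
        rw [ih (pre ++ ['a']) (c0 + 1) r0 (by simp [h])]
        simp
      · by_cases hg : c = 'g'
        · subst hg
          simp only [List.foldl_cons, pvBSum, reduceIte, if_neg ha]
          rw [ih (pre ++ ['g']) c0 (r0 + c0) (by simp [h, List.count_append])]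
          omega
        · simp only [List.foldl_cons, pvBSum, if_neg ha, if_neg hg]
          rw [ih (pre ++ [c]) c0 r0 (by simp [h, List.count_append, ha])]
          simp

-- ===== VERDICT (by name: the statement is the Claim_ definition above) =====
theorem SpecialSubsequencesAG_spec : Claim_equal_SpecialSubsequencesAG := by
  intro s _
  unfold Spec_SpecialSubsequencesAG SpecialSubsequencesAG SpecialSubsequencesAG_alt
  rw [pvFold_eq_bsum _ [] 0 0 (by simp)]
  simp
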